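-- pv_equiv track=rewrite | github.com/hssg1109/sec_audit_playbook | tools/scripts/build_target.py | pick_primary_jar
-- ===== SOURCE A (Python) =====
-- def pick_primary_jar(artifacts: list[dict]) -> str | None:
--     """아티팩트 목록에서 Joern 분석용 주 JAR/WAR를 선택한다.
--
--     선택 기준:
--     1. WAR 파일 우선 (서블릿 컨테이너 전체 포함)
--     2. 가장 큰 JAR (Boot fat-jar일 가능성 높음)
--     3. 이름에 'plain'이 없는 것
--     """
--     jars = [a for a in artifacts if a["type"] in ("jar", "war")]
--     if not jars:
--         return None
--     # WAR 우선
--     wars = [a for a in jars if a["type"] == "war"]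
--     if wars:
--         return wars[0]["path"]
--     # 가장 큰 JAR
--     return jars[0]["path"]
-- ===== SOURCE B (Python) =====
-- def pick_primary_jar(artifacts):
--     """Single scan tracking the first WAR and the first JAR/WAR candidate."""
--     first_war = None
--     first_candidate = None
--     for a in artifacts:
--         t = a["type"]
--         if first_war is None and t == "war":
--             first_war = a
--         if first_candidate is None and t in ("jar", "war"):
--             first_candidate = a
--     if first_war is not None:
--         return first_war["path"]
--     if first_candidate is not None:
--         return first_candidate["path"]
--     return None
-- ===== Notes on version B (the rewrite author's own statement) =====
-- stated objective: alternative
-- what changed: Replaces A's two list-comprehension filtering passes (building jars, then wars) with one scan over artifacts that tracks the first WAR and the first JAR/WAR candidate, building no intermediate lists.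
import Mathlib
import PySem

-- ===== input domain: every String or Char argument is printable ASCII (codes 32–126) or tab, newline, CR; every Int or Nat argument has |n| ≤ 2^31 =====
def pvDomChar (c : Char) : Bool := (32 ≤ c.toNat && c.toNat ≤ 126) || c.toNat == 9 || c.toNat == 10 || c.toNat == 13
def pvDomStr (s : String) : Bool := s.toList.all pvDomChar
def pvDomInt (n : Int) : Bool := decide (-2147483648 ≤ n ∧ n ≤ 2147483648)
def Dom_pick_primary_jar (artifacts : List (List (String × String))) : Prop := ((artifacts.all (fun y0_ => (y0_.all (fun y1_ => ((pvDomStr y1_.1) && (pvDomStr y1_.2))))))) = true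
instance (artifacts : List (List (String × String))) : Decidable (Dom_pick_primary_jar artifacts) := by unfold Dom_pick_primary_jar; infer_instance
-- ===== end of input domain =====

-- B replaces A's two filtering passes with a single scan tracking the first WAR and first JAR/WAR candidate (alternative decomposition, same cost). Equivalence is about the return value.


-- ===== PORT A =====
-- a[k] on a dict: first-match lookup in the association list; none = KeyError (excluded by Pre_).
def pvGet (a : List (String × String)) (k : String) : Option String := (PySem.Dict.mk a).get? k

def pick_primary_jar (artifacts : List (List (String × String))) : Option String :=
  let jars := artifacts.filter (fun a =>
    pvGet a "type" == some "jar" || pvGet a "type" == some "war")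
  if jars.isEmpty then none
  else
    let wars := jars.filter (fun a => pvGet a "type" == some "war")
    match wars with
    | w :: _ => pvGet w "path"
    | [] =>
      match jars with
      | j :: _ => pvGet j "path"
      | [] => none

-- ===== PORT B =====
def pick_primary_jar_alt (artifacts : List (List (String × String))) : Option String :=
  let s := artifacts.foldl (fun (s : Option (List (String × String)) × Option (List (String × String))) a =>
    let t := pvGet a "type"
    let fw := if s.1.isNone && t == some "war" then some a else s.1
    let fc := if s.2.isNone && (t == some "jar" || t == some "war") then some a else s.2
    (fw, fc)) (none, none)
  match s.1 with
  | some w => pvGet w "path"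
  | none =>
    match s.2 with
    | some c => pvGet c "path"
    | none => none

-- ===== PRECONDITION & SPEC =====
-- helper predicates used only to state Pre_ (same tests as the programs' membership checks)
def pvIsWar (a : List (String × String)) : Bool := pvGet a "type" == some "war"
def pvIsCand (a : List (String × String)) : Bool := pvGet a "type" == some "jar" || pvIsWar a
-- Pre_ excludes exactly the inputs where the Python raises KeyError (B raises there too):
-- some artifact lacks a "type" key, or the selected artifact (first WAR, else first JAR/WAR) lacks a "path" key.
def Pre_pick_primary_jar (artifacts : List (List (String × String))) : Prop :=
  (artifacts.all (fun a => (pvGet a "type").isSome)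
    && (match (artifacts.filter pvIsWar).head? with
        | some w => (pvGet w "path").isSome
        | none =>
          match (artifacts.filter pvIsCand).head? with
          | some c => (pvGet c "path").isSome
          | none => true)) = true
instance (artifacts : List (List (String × String))) : Decidable (Pre_pick_primary_jar artifacts) := by unfold Pre_pick_primary_jar; infer_instance
def pvWitness_pick_primary_jar : (List (List (String × String))) :=
  [[("type", "jar"), ("path", "a.jar")], [("type", "war"), ("path", "a.war")], [("type", "zip")]]
def Spec_pick_primary_jar (artifacts : List (List (String × String))) (out : Option String) : Prop := out = pick_primary_jar_alt artifacts
instance (artifacts : List (List (String × String))) (out : Option String) : Decidable (Spec_pick_primary_jar artifacts out) := by unfold Spec_pick_primary_jar; infer_instance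

-- ===== CLAIM (what is proved, stated in full; the proofs are below) =====
def Claim_equal_pick_primary_jar : Prop := ∀ (artifacts : List (List (String × String))), Dom_pick_primary_jar artifacts → Pre_pick_primary_jar artifacts → Spec_pick_primary_jar artifacts (pick_primary_jar artifacts)

-- ===== LEMMAS AND PROOFS =====

-- B's fold yields (first WAR, first JAR/WAR candidate) of the scanned list, seeded by the accumulator.
lemma pv_fold_char (artifacts : List (List (String × String)))
    (fw fc : Option (List (String × String))) :
    artifacts.foldl (fun (s : Option (List (String × String)) × Option (List (String × String))) a =>
      let t := pvGet a "type"
      let fw := if s.1.isNone && t == some "war" then some a else s.1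
      let fc := if s.2.isNone && (t == some "jar" || t == some "war") then some a else s.2
      (fw, fc)) (fw, fc)
    = (fw.or (artifacts.filter pvIsWar).head?, fc.or (artifacts.filter pvIsCand).head?) := by
  induction artifacts generalizing fw fc with
  | nil => simp
  | cons a tl ih =>
    simp only [List.foldl_cons, List.filter_cons]
    by_cases hw : pvGet a "type" == some "war" <;>
      by_cases hj : pvGet a "type" == some "jar" <;>
        cases fw <;> cases fc <;>
          simp_all [pvIsWar, pvIsCand, Option.or]

lemma pv_war_imp_cand (a : List (String × String)) (h : pvIsWar a = true) : pvIsCand a = true := by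
  simp [pvIsCand, h]

-- filtering WARs out of A's jars list equals filtering WARs out of the whole list
lemma pv_filter_war (artifacts : List (List (String × String))) :
    (artifacts.filter pvIsCand).filter pvIsWar = artifacts.filter pvIsWar := by
  rw [List.filter_filter]
  apply List.filter_congr
  intro a _
  by_cases hw : pvIsWar a = true
  · simp [hw, pv_war_imp_cand a hw]
  · simp at hw; simp [hw]

-- ===== VERDICT (by name: the statement is the Claim_ definition above) =====
theorem pick_primary_jar_spec : Claim_equal_pick_primary_jar := by
  intro artifacts _ _
  unfold Spec_pick_primary_jar pick_primary_jar pick_primary_jar_alt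
  rw [pv_fold_char]
  simp only [Option.or]
  have hfw := pv_filter_war artifacts
  show (if (artifacts.filter pvIsCand).isEmpty then none
        else match (artifacts.filter pvIsCand).filter pvIsWar with
          | w :: _ => pvGet w "path"
          | [] => match artifacts.filter pvIsCand with
            | j :: _ => pvGet j "path"
            | [] => none) = _
  rw [hfw]
  cases hW : artifacts.filter pvIsWar with
  | cons w tw =>
    have hne : (artifacts.filter pvIsCand).isEmpty = false := by
      cases hcc : artifacts.filter pvIsCand with
      | nil =>
        exfalso
        have hwmem : w ∈ artifacts.filter pvIsWar := by rw [hW]; exact List.mem_cons_self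
        have hwc : w ∈ artifacts.filter pvIsCand :=
          List.mem_filter.mpr ⟨List.mem_of_mem_filter hwmem, pv_war_imp_cand w (List.of_mem_filter hwmem)⟩
        rw [hcc] at hwc; simp at hwc
      | cons c tc => simp
    simp [hne]
  | nil =>
    cases hC : artifacts.filter pvIsCand with
    | nil => simp
    | cons c tc => simp
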